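-- pv_equiv track=rewrite | github.com/Young-Ho-Boss/parallel | t.py | diagonal_vector
-- ===== SOURCE A (Python) =====
-- def diagonal_vector(U: list) -> list:
--     n = len(U)
--     dVecs = []
--     for i in range(n):
--         dVec = []
--         for j in range(n):
--             dVec.append(U[j][(j+i) % n])
--         dVecs.append(dVec)
--     return dVecs
-- ===== SOURCE B (Python) =====
-- def diagonal_vector(U: list) -> list:
--     n = len(U)
--     square = [[U[j][k] for k in range(n)] for j in range(n)]
--     rows = [square[j][j:] + square[j][:j] for j in range(n)]
--     return [list(t) for t in zip(*rows)]
-- ===== Notes on version B (the rewrite author's own statement) =====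
-- stated objective: alternative
-- what changed: Replaces A's per-element modular-index gather (dVec[i][j] = U[j][(j+i)%n]) by copying the n-by-n prefix, cyclically rotating each row with two slices, and transposing with zip(*rows).
import Mathlib
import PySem

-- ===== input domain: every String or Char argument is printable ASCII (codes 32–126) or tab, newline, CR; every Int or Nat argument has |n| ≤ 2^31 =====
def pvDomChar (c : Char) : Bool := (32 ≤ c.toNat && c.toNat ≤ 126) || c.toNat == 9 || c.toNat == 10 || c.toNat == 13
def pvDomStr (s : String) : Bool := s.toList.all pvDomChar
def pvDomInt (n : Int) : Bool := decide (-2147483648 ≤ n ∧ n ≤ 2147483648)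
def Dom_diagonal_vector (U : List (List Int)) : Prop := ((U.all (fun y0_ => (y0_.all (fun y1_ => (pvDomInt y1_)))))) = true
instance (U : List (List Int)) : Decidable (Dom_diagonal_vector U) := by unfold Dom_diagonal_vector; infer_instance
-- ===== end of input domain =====

-- B builds each cyclically rotated row by two slices and transposes them with zip(*rows)
-- instead of A's per-element modular-index gather loops; return values agree on Pre_.

-- ===== PORT A =====
def diagonal_vector (U : List (List Int)) : List (List Int) :=
  let n : Int := U.length
  (PySem.List.pyRange 0 n 1).foldl (fun dVecs i =>
    dVecs ++ [(PySem.List.pyRange 0 n 1).foldl (fun dVec j =>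
      dVec ++ [PySem.List.pyGetD (PySem.List.pyGetD U j []) (PySem.Int.mod (j + i) n) 0]) []]) []

-- ===== PORT B =====
-- zip(*rows): columns up to the minimum row length (exact Python zip semantics on lists)
def pyZipStar (rows : List (List Int)) : List (List Int) :=
  if rows.isEmpty then []
  else (List.range ((rows.map List.length).foldl min rows.headI.length)).map
    (fun i => rows.map (fun r => r.getD i 0))

def diagonal_vector_alt (U : List (List Int)) : List (List Int) :=
  let n : Int := U.length
  let square := (PySem.List.pyRange 0 n 1).map (fun j =>
    (PySem.List.pyRange 0 n 1).map (fun k => PySem.List.pyGetD (PySem.List.pyGetD U j []) k 0))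
  let rows := (PySem.List.pyRange 0 n 1).map (fun j =>
    PySem.List.slice (PySem.List.pyGetD square j []) (some j) none ++
    PySem.List.slice (PySem.List.pyGetD square j []) none (some j))
  pyZipStar rows

-- ===== PRECONDITION & SPEC =====
-- Pre_: exactly the inputs on which A returns normally (every row at least n = len(U) long);
-- on any shorter row A raises IndexError.
def Pre_diagonal_vector (U : List (List Int)) : Prop :=
  ∀ row ∈ U, U.length ≤ row.length
instance (U : List (List Int)) : Decidable (Pre_diagonal_vector U) := by
  unfold Pre_diagonal_vector; infer_instance

def pvWitness_diagonal_vector : List (List Int) := [[1, 2, 3], [4, 5, 6], [7, 8, 9]]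

def Spec_diagonal_vector (U : List (List Int)) (out : List (List Int)) : Prop := out = diagonal_vector_alt U
instance (U : List (List Int)) (out : List (List Int)) : Decidable (Spec_diagonal_vector U out) := by unfold Spec_diagonal_vector; infer_instance

-- ===== CLAIM (what is proved, stated in full; the proofs are below) =====
def Claim_equal_diagonal_vector : Prop := ∀ (U : List (List Int)), Dom_diagonal_vector U → Pre_diagonal_vector U → Spec_diagonal_vector U (diagonal_vector U)

-- ===== LEMMAS AND PROOFS =====

-- the common normal form both ports are reduced to
def gatherForm (U : List (List Int)) : List (List Int) :=
  (List.range U.length).map (fun i => (List.range U.length).map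
    (fun j => (U.getD j []).getD ((j + i) % U.length) 0))

theorem mod_cast_nat (j i n : Nat) (hn : 0 < n) :
    PySem.Int.mod ((j : Int) + (i : Int)) (n : Int) = (((j + i) % n : Nat) : Int) := by
  rw [PySem.Int.mod_eq_emod_of_pos (by exact_mod_cast hn : (0 : Int) < (n : Int))]
  push_cast
  rfl

theorem portA_eq_gather (U : List (List Int)) : diagonal_vector U = gatherForm U := by
  unfold diagonal_vector gatherForm
  rcases Nat.eq_zero_or_pos U.length with h0 | hn
  · simp [h0, PySem.List.pyRange_one_eq_nil]
  · simp only [PySem.List.pyRange_zero_natCast, PySem.List.foldl_append_singleton_eq_map,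
      List.nil_append, List.map_map]
    refine List.map_congr_left fun i _ => ?_
    refine List.map_congr_left fun j _ => ?_
    simp only [Function.comp_apply]
    rw [mod_cast_nat j i U.length hn]
    simp only [PySem.List.pyGetD_natCast, List.getD_eq_getElem?_getD]

theorem foldl_min_const (l : List Nat) (n : Nat) (h : ∀ x ∈ l, x = n) :
    l.foldl min n = n := by
  induction l with
  | nil => rfl
  | cons a t ih =>
    have ha : a = n := h a (List.mem_cons_self ..)
    simp only [List.foldl_cons, ha, min_self]
    exact ih fun x hx => h x (List.mem_cons_of_mem _ hx)

-- pure cyclic rotation, elementwise (for a list of length exactly n)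
theorem rot_getD (l : List Int) (n i j : Nat) (hl : l.length = n)
    (hi : i < n) (hj : j < n) :
    (l.drop j ++ l.take j).getD i 0 = l.getD ((j + i) % n) 0 := by
  have hdrop : (l.drop j).length = n - j := by simp [List.length_drop, hl]
  simp only [List.getD_eq_getElem?_getD]
  by_cases hcase : i < n - j
  · rw [List.getElem?_append_left (by omega), List.getElem?_drop]
    rw [Nat.mod_eq_of_lt (by omega : j + i < n)]
  · rw [List.getElem?_append_right (by omega), hdrop,
      List.getElem?_take_of_lt (by omega : i - (n - j) < j)]
    have hmod : (j + i) % n = i - (n - j) := by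
      have h2 : (j + i) % n = (j + i - n) % n := by
        conv_lhs => rw [show j + i = (j + i - n) + n by omega]
        simp [Nat.add_mod_right]
      rw [h2, Nat.mod_eq_of_lt (by omega)]; omega
    rw [hmod]

theorem headI_map_range {α : Type} [Inhabited α] (f : Nat → α) (n : Nat) (hn : 0 < n) :
    ((List.range n).map f).headI = f 0 := by
  obtain ⟨m, rfl⟩ : ∃ m, n = m + 1 := ⟨n - 1, by omega⟩
  rw [List.range_succ_eq_map]
  simp

theorem map_range_getD {α : Type} (f : Nat → α) (n m : Nat) (d : α) (hm : m < n) :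
    ((List.range n).map f).getD m d = f m := by
  rw [List.getD_eq_getElem?_getD, List.getElem?_map, List.getElem?_range hm]
  rfl

theorem portB_eq_gather (U : List (List Int)) : diagonal_vector_alt U = gatherForm U := by
  simp only [diagonal_vector_alt, pyZipStar, gatherForm]
  rcases Nat.eq_zero_or_pos U.length with h0 | hn
  · simp [h0, PySem.List.pyRange_one_eq_nil]
  · set n := U.length with hn_def
    have hrowsL : (PySem.List.pyRange 0 (n : Int) 1).map (fun j =>
        PySem.List.slice (PySem.List.pyGetD ((PySem.List.pyRange 0 (n : Int) 1).map (fun j' =>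
          (PySem.List.pyRange 0 (n : Int) 1).map (fun k =>
            PySem.List.pyGetD (PySem.List.pyGetD U j' []) k 0))) j []) (some j) none ++
        PySem.List.slice (PySem.List.pyGetD ((PySem.List.pyRange 0 (n : Int) 1).map (fun j' =>
          (PySem.List.pyRange 0 (n : Int) 1).map (fun k =>
            PySem.List.pyGetD (PySem.List.pyGetD U j' []) k 0))) j []) none (some j))
        = (List.range n).map (fun j =>
            (((List.range n).map (fun k => (U.getD j []).getD k 0)).drop j ++
             ((List.range n).map (fun k => (U.getD j []).getD k 0)).take j)) := by
      conv_lhs => rw [PySem.List.pyRange_zero_natCast, List.map_map]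
      refine List.map_congr_left fun j hj => ?_
      have hj' : j < n := List.mem_range.mp hj
      simp only [Function.comp_apply, PySem.List.pyGetD_natCast, List.map_map]
      rw [map_range_getD _ n j [] hj']
      rw [PySem.List.slice_from_natCast, PySem.List.slice_to_natCast]
      congr 2 <;>
        exact List.map_congr_left fun k _ => by
          simp only [Function.comp_apply, PySem.List.pyGetD_natCast]
    rw [hrowsL]
    have hrowlen : ∀ j : Nat,
        ((((List.range n).map (fun k => (U.getD j []).getD k 0)).drop j ++
          ((List.range n).map (fun k => (U.getD j []).getD k 0)).take j)).length = n := by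
      intro j
      simp only [List.length_append, List.length_take, List.length_drop,
        List.length_map, List.length_range]
      omega
    have hne : ¬ ((List.range n).map fun j =>
        (((List.range n).map (fun k => (U.getD j []).getD k 0)).drop j ++
         ((List.range n).map (fun k => (U.getD j []).getD k 0)).take j)).isEmpty = true := by
      simp only [List.isEmpty_iff, List.map_eq_nil_iff, List.range_eq_nil]
      omega
    rw [if_neg hne]
    have hmin : (((List.range n).map fun j =>
        (((List.range n).map (fun k => (U.getD j []).getD k 0)).drop j ++
         ((List.range n).map (fun k => (U.getD j []).getD k 0)).take j)).map List.length).foldl min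
        ((List.range n).map fun j =>
         (((List.range n).map (fun k => (U.getD j []).getD k 0)).drop j ++
          ((List.range n).map (fun k => (U.getD j []).getD k 0)).take j)).headI.length = n := by
      have hhead : ((List.range n).map fun j =>
          (((List.range n).map (fun k => (U.getD j []).getD k 0)).drop j ++
           ((List.range n).map (fun k => (U.getD j []).getD k 0)).take j)).headI.length = n := by
        rw [headI_map_range _ n hn]
        exact hrowlen 0
      rw [hhead]
      refine foldl_min_const _ _ ?_
      intro x hx
      simp only [List.map_map, List.mem_map, List.mem_range, Function.comp_apply] at hx
      obtain ⟨j, hj, rfl⟩ := hx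
      exact hrowlen j
    rw [hmin]
    refine List.map_congr_left fun i hi => ?_
    rw [List.map_map]
    refine List.map_congr_left fun j hj => ?_
    have hi' : i < n := List.mem_range.mp hi
    have hj' : j < n := List.mem_range.mp hj
    simp only [Function.comp_apply]
    rw [rot_getD _ n i j (by simp) hi' hj']
    exact map_range_getD _ n _ 0 (Nat.mod_lt _ hn)

-- ===== VERDICT (by name: the statement is the Claim_ definition above) =====
theorem diagonal_vector_spec : Claim_equal_diagonal_vector := by
  intro U _ hpre
  unfold Spec_diagonal_vector
  rw [portA_eq_gather, portB_eq_gather]
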